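-- pv_equiv track=rewrite | github.com/Blue-Cheesecake/_-Depreciated-_My-Playground | Intermediete/Test_DistanceAtleastK.py | Solution
-- ===== SOURCE A (Python) =====
-- def Solution(nums=list, k=int):
--     if 1 in nums:
--         indx = nums.index(1)
--         count = 0
--         result = True
--         for i in range(indx+1, (len(nums))):
--             if nums[i] == 0:
--                 count += 1
--             elif nums[i] == 1:
--                 if count < k:
--                     result = False
--                 count = 0
--     else:
--         return False
--     return result
-- ===== SOURCE B (Python) =====
-- def Solution(nums=list, k=int):
--     positions = [i for i, x in enumerate(nums) if x == 1]
--     if not positions: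
--         return False
--     return all(nums[a + 1:b].count(0) >= k for a, b in zip(positions, positions[1:]))
-- ===== Notes on version B (the rewrite author's own statement) =====
-- stated objective: idiomatic
-- what changed: Replaces the index-loop state machine (running zero counter with reset, sticky result flag) by collecting the positions of the 1s once and checking each consecutive pair with a slice's zero count via zip/all.
import Mathlib
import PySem

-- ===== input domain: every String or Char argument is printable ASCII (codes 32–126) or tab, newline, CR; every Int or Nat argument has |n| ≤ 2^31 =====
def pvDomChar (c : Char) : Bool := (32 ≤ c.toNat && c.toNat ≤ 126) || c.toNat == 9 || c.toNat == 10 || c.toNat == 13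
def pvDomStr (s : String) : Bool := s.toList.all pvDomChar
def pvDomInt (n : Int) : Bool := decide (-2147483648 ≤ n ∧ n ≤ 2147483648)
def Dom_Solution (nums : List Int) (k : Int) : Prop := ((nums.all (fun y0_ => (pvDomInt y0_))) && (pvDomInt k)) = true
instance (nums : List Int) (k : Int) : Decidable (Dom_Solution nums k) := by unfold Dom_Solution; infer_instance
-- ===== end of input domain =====

-- B collects the positions of the 1s once and checks each consecutive pair with a slice's zero
-- count (zip/all), instead of A's index loop with a running zero counter and sticky result flag.

-- ===== PORT A =====
def Solution (nums : List Int) (k : Int) : Bool :=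
  if 1 ∈ nums then
    match PySem.List.index? nums 1 with
    | none => false  -- unreachable: guarded by '1 ∈ nums'
    | some indx =>
      let st :=
        (PySem.List.pyRange ((indx : Int) + 1) (nums.length : Int) 1).foldl
          (fun (st : Int × Bool) i =>
            if PySem.List.pyGetD nums i 0 = 0 then (st.1 + 1, st.2)
            else if PySem.List.pyGetD nums i 0 = 1 then
              (0, if st.1 < k then false else st.2)
            else st)
          (0, true)
      st.2
  else false

-- ===== PORT B =====
def Solution_alt (nums : List Int) (k : Int) : Bool :=
  let positions :=
    (PySem.List.enumerate nums 0).filterMap (fun p => if p.2 = 1 then some p.1 else none)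
  if positions.isEmpty then false
  else
    (positions.zip (PySem.List.slice positions (some 1) none)).all
      (fun p =>
        decide (k ≤ (PySem.List.count (PySem.List.slice nums (some (p.1 + 1)) (some p.2)) 0 : Int)))

-- ===== PRECONDITION & SPEC =====
def Spec_Solution (nums : List Int) (k : Int) (out : Bool) : Prop := out = Solution_alt nums k
instance (nums : List Int) (k : Int) (out : Bool) : Decidable (Spec_Solution nums k out) := by unfold Spec_Solution; infer_instance

-- ===== CLAIM (what is proved, stated in full; the proofs are below) =====
def Claim_equal_Solution : Prop := ∀ (nums : List Int) (k : Int), Dom_Solution nums k → Spec_Solution nums k (Solution nums k)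

-- ===== LEMMAS AND PROOFS =====

-- common specification: walk the tail after the first 1 with a running zero counter
def chk (k : Int) : List Int → Int → Bool
  | [], _ => true
  | x :: t, c =>
    if x = 0 then chk k t (c + 1)
    else if x = 1 then (decide (k ≤ c) && chk k t 0)
    else chk k t c

-- positions of the 1s in l, offset by i (what B's filterMap of enumerate computes)
def pa : Int → List Int → List Int
  | _, [] => []
  | i, x :: t => if x = 1 then i :: pa (i + 1) t else pa (i + 1) t

-- B's chained pairwise check, written as a recursion over the position list
def chainB (nums : List Int) (k : Int) : Int → List Int → Bool
  | _, [] => true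
  | a, b :: r =>
    (decide (k ≤ (PySem.List.count (PySem.List.slice nums (some (a + 1)) (some b)) 0 : Int))) &&
      chainB nums k b r

-- A's loop body, named so the fold can be rewritten
def stepA (k : Int) (st : Int × Bool) (x : Int) : Int × Bool :=
  if x = 0 then (st.1 + 1, st.2)
  else if x = 1 then ((0 : Int), if st.1 < k then false else st.2)
  else st

theorem enum_filterMap (l : List Int) (s : Int) :
    (PySem.List.enumerate l s).filterMap (fun p => if p.2 = 1 then some p.1 else none) = pa s l := by
  induction l generalizing s with
  | nil => simp [PySem.List.enumerate_nil, pa]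
  | cons x t ih =>
    rw [PySem.List.enumerate_cons]
    by_cases hx : x = 1 <;> simp [pa, hx, ih]

theorem pa_nil (l : List Int) (i : Int) (h : 1 ∉ l) : pa i l = [] := by
  induction l generalizing i with
  | nil => rfl
  | cons x t ih =>
    simp only [List.mem_cons, not_or] at h
    simp [pa, Ne.symm h.1, ih (i + 1) h.2]

theorem pa_append (a b : List Int) (i : Int) :
    pa i (a ++ b) = pa i a ++ pa (i + a.length) b := by
  induction a generalizing i with
  | nil => simp [pa]
  | cons x t ih =>
    by_cases hx : x = 1 <;>
      simp [pa, hx, ih (i + 1)] <;> ring_nf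

theorem chk_no_one (k : Int) (l : List Int) (c : Int) (h : 1 ∉ l) : chk k l c = true := by
  induction l generalizing c with
  | nil => rfl
  | cons x t ih =>
    simp only [List.mem_cons, not_or] at h
    by_cases hx : x = 0 <;> simp [chk, hx, Ne.symm h.1, ih _ h.2]

theorem chk_split (k : Int) (p t : List Int) (c : Int) (h : 1 ∉ p) :
    chk k (p ++ 1 :: t) c = (decide (k ≤ c + (p.count 0 : Int)) && chk k t 0) := by
  induction p generalizing c with
  | nil => simp [chk]
  | cons x q ih =>
    simp only [List.mem_cons, not_or] at h
    have hx1 : ¬ x = 1 := Ne.symm h.1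
    by_cases hx : x = 0
    · subst hx
      rw [List.cons_append, chk, if_pos rfl, ih _ h.2]
      have : c + 1 + ((q.count 0 : Nat) : Int) = c + (((0 : Int) :: q).count 0 : Nat) := by
        simp; omega
      rw [this]
    · rw [List.cons_append, chk, if_neg hx, if_neg hx1, ih _ h.2]
      have : (((x :: q).count 0 : Nat) : Int) = ((q.count 0 : Nat) : Int) := by
        simp [hx]
      rw [this]

theorem zip_all_chainB (nums : List Int) (k : Int) (r : List Int) (a : Int) :
    (((a :: r).zip r).all
      (fun p =>
        decide (k ≤ (PySem.List.count (PySem.List.slice nums (some (p.1 + 1)) (some p.2)) 0 : Int))))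
      = chainB nums k a r := by
  induction r generalizing a with
  | nil => rfl
  | cons b q ih =>
    rw [List.zip_cons_cons, List.all_cons, ih b]
    simp [chainB]

theorem first_one (s : List Int) (h : 1 ∈ s) :
    ∃ p t, s = p ++ 1 :: t ∧ 1 ∉ p := by
  have hs : (PySem.List.index? s 1).isSome := (PySem.List.index?_isSome_iff s 1).mpr h
  obtain ⟨j, hj⟩ := Option.isSome_iff_exists.mp hs
  obtain ⟨p, t, h1, _, h3⟩ := (PySem.List.index?_eq_some_iff s 1 j).mp hj
  exact ⟨p, t, h1, h3⟩

theorem chainB_eq_chk (nums : List Int) (k : Int) :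
    ∀ (n : Nat) (s : List Int), s.length ≤ n → ∀ (prev : Nat), nums.drop (prev + 1) = s →
      chainB nums k (prev : Int) (pa ((prev : Int) + 1) s) = chk k s 0 := by
  intro n
  induction n with
  | zero =>
    intro s hs prev hdrop
    have hnil : s = [] := List.eq_nil_of_length_eq_zero (by omega)
    subst hnil
    rfl
  | succ m ih =>
    intro s hs prev hdrop
    by_cases h1 : 1 ∈ s
    · obtain ⟨p, t, hst, hnp⟩ := first_one s h1
      subst hst
      rw [pa_append, pa_nil p _ hnp, List.nil_append]
      rw [show pa ((prev : Int) + 1 + (p.length : Int)) (1 :: t)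
            = ((prev : Int) + 1 + (p.length : Int)) ::
              pa ((prev : Int) + 1 + (p.length : Int) + 1) t from by simp [pa]]
      rw [chainB]
      have hcast2 : (prev : Int) + 1 + (p.length : Int) = ((prev + 1 + p.length : Nat) : Int) := by
        push_cast; ring
      have hcast1 : (prev : Int) + 1 = ((prev + 1 : Nat) : Int) := by push_cast; ring
      have hslice : PySem.List.slice nums (some ((prev : Int) + 1))
          (some ((prev : Int) + 1 + (p.length : Int))) = p := by
        rw [hcast2, hcast1, PySem.List.slice_natCast, hdrop,
          show prev + 1 + p.length - (prev + 1) = p.length from by omega]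
        exact List.take_left
      rw [hslice]
      have hdrop2 : nums.drop (prev + 1 + p.length + 1) = t := by
        have h5 : nums.drop (prev + 1 + p.length + 1)
            = (nums.drop (prev + 1)).drop (p.length + 1) := by
          rw [List.drop_drop]; ring_nf
        rw [h5, hdrop, show p ++ 1 :: t = (p ++ [1]) ++ t from by simp,
          show p.length + 1 = (p ++ [1]).length from by simp]
        exact List.drop_left
      have hlen : t.length ≤ m := by
        have h6 := hs
        simp only [List.length_append, List.length_cons] at h6
        omega
      have hrec := ih t hlen (prev + 1 + p.length) hdrop2
      rw [show (((prev + 1 + p.length : Nat) : Int)) + 1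
            = (prev : Int) + 1 + (p.length : Int) + 1 from by push_cast; ring] at hrec
      rw [show (((prev + 1 + p.length : Nat) : Int))
            = (prev : Int) + 1 + (p.length : Int) from by push_cast; ring] at hrec
      rw [hrec, chk_split k p t 0 hnp, PySem.List.count_eq]
      simp
    · rw [pa_nil s _ h1, chk_no_one k s 0 h1]
      rfl

theorem foldA (k : Int) (t : List Int) (c : Int) (r : Bool) :
    (t.foldl (stepA k) (c, r)).2 = (r && chk k t c) := by
  induction t generalizing c r with
  | nil => simp [chk]
  | cons x q ih =>
    by_cases hx : x = 0
    · rw [List.foldl_cons, show stepA k (c, r) x = (c + 1, r) from by simp [stepA, hx], ih,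
        chk, if_pos hx]
    · by_cases hx1 : x = 1
      · rw [List.foldl_cons,
          show stepA k (c, r) x = ((0 : Int), if c < k then false else r) from by
            simp [stepA, hx1],
          ih, chk, if_neg hx, if_pos hx1]
        by_cases hck : c < k
        · have h7 : ¬ k ≤ c := by omega
          simp [hck, h7]
        · have h7 : k ≤ c := by omega
          simp [hck, h7]
      · rw [List.foldl_cons, show stepA k (c, r) x = (c, r) from by simp [stepA, hx, hx1], ih,
          chk, if_neg hx, if_neg hx1]

theorem solution_eq_chk (nums : List Int) (k : Int) (j : Nat)
    (h1 : 1 ∈ nums) (hj : PySem.List.index? nums 1 = some j) :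
    Solution nums k = chk k (nums.drop (j + 1)) 0 := by
  have hfold : (PySem.List.pyRange ((j : Int) + 1) (nums.length : Int) 1).foldl
      (fun (st : Int × Bool) i =>
        if PySem.List.pyGetD nums i 0 = 0 then (st.1 + 1, st.2)
        else if PySem.List.pyGetD nums i 0 = 1 then
          ((0 : Int), if st.1 < k then false else st.2)
        else st) ((0 : Int), true)
      = (nums.drop ((j : Int) + 1).toNat).foldl (stepA k) ((0 : Int), true) :=
    PySem.List.foldl_pyRange_pyGetD (xs := nums) (a := (j : Int) + 1) (d := 0)
      (f := stepA k) (init := ((0 : Int), true)) (by positivity)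
  simp only [Solution, if_pos h1, hj]
  rw [hfold, show ((j : Int) + 1).toNat = j + 1 from by omega, foldA, Bool.true_and]

-- ===== VERDICT (by name: the statement is the Claim_ definition above) =====
theorem Solution_spec : Claim_equal_Solution := by
  intro nums k _
  unfold Spec_Solution Solution_alt
  simp only [enum_filterMap]
  by_cases h1 : 1 ∈ nums
  · obtain ⟨p, t, hst, hnp⟩ := first_one nums h1
    have hj : PySem.List.index? nums 1 = some p.length :=
      (PySem.List.index?_eq_some_iff nums 1 p.length).mpr ⟨p, t, hst, rfl, hnp⟩
    have hdrop : nums.drop (p.length + 1) = t := by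
      rw [hst, show p ++ 1 :: t = (p ++ [1]) ++ t from by simp,
        show p.length + 1 = (p ++ [1]).length from by simp]
      exact List.drop_left
    rw [solution_eq_chk nums k p.length h1 hj, hdrop]
    have hpa : pa 0 nums = (p.length : Int) :: pa ((p.length : Int) + 1) t := by
      rw [hst, pa_append, pa_nil p 0 hnp, List.nil_append,
        show (0 : Int) + (p.length : Int) = (p.length : Int) from by ring]
      simp [pa]
    rw [hpa]
    simp only [List.isEmpty_cons, Bool.false_eq_true, if_false, PySem.List.slice_from_one,
      List.tail_cons]
    rw [zip_all_chainB, chainB_eq_chk nums k t.length t le_rfl p.length hdrop]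
  · have hpa : pa 0 nums = [] := pa_nil nums 0 h1
    simp [Solution, h1, hpa]
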